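-- pv_equiv track=rewrite | github.com/Ashiq-am/Path-of-Python | 39.Python Programming Examples/10.Date-Time Programs/Python program to calculate Date, Month and Year from Seconds/Python program to calculate Date, Month and Year from Seconds.py | monthCnt
-- ===== SOURCE A (Python) =====
-- def dayInYear(year):
--     if (year % 4) == 0:
--         if (year % 100) == 0:
--             if (year % 400) == 0:
--                 return 366
--             else:
--                 return 365
--         else:
--             return 366
--     else:
--         return 365
--
-- def monthCnt(days, year):
--     if days == 0:
--         return 1, 0
--     else:
--         month_num = 1
--         months = [31, 28, 31, 30, 31,
--                   30, 31, 31, 30, 31,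
--                   30, 31]
--         if dayInYear(year) == 366:
--             months[1] = 29
--         for day in months:
--             if day < days:
--                 month_num += 1
--                 days -= day
--             else:
--                 break
--         return month_num, days
-- ===== SOURCE B (Python) =====
-- def monthCnt(days, year):
--     leap = year % 4 == 0 and (year % 100 != 0 or year % 400 == 0)
--     months = [31, 29 if leap else 28, 31, 30, 31,
--               30, 31, 31, 30, 31, 30, 31]
--     cums = []
--     total = 0
--     for m in months:
--         total += m
--         cums.append(total)
--     less = [c for c in cums if c < days]
--     return 1 + len(less), days - (less[-1] if less else 0)
-- ===== Notes on version B (the rewrite author's own statement) =====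
-- stated objective: alternative
-- what changed: B precomputes the cumulative month-length sums and derives the month as 1 + the count of cumulative sums strictly below days and the remainder as days minus the largest such sum, replacing A's break-out loop that mutates days and A's special branch for days == 0.
import Mathlib
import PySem

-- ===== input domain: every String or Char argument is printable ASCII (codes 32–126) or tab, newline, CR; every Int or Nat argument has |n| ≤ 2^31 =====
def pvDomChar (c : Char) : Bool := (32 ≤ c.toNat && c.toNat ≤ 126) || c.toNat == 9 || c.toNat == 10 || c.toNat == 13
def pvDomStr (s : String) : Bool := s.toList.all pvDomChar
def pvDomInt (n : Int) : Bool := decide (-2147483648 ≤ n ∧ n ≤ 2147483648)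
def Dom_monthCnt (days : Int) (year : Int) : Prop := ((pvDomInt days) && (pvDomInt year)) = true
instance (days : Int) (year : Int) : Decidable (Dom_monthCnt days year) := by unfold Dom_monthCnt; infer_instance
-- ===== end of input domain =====

-- B computes the answer from the cumulative month-length sums (count/last of those below
-- `days`) instead of A's break-out loop mutating `days`; same cost, different decomposition.

-- ===== PORT A =====
def dayInYear (year : Int) : Int :=
  if PySem.Int.mod year 4 = 0 then
    if PySem.Int.mod year 100 = 0 then
      if PySem.Int.mod year 400 = 0 then 366 else 365
    else 366
  else 365

-- the for-loop with `break`: recursion over the remaining months with state (month_num, days)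
def monthLoop : List Int → Int → Int → Int × Int
  | [], month_num, days => (month_num, days)
  | day :: rest, month_num, days =>
      if day < days then monthLoop rest (month_num + 1) (days - day)
      else (month_num, days)

def monthCnt (days : Int) (year : Int) : Int × Int :=
  if days = 0 then (1, 0)
  else
    let months : List Int := [31, 28, 31, 30, 31, 30, 31, 31, 30, 31, 30, 31]
    -- months[1] = 29
    let months := if dayInYear year = 366 then months.set 1 29 else months
    monthLoop months 1 days

-- ===== PORT B =====
def monthCnt_alt (days : Int) (year : Int) : Int × Int :=
  let leap : Bool := PySem.Int.mod year 4 == 0 && (PySem.Int.mod year 100 != 0 || PySem.Int.mod year 400 == 0)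
  let months : List Int := [31, if leap then 29 else 28, 31, 30, 31, 30, 31, 31, 30, 31, 30, 31]
  -- running-total loop building cums
  let cums := (months.foldl (fun (acc : List Int × Int) m => (acc.1 ++ [acc.2 + m], acc.2 + m)) ([], 0)).1
  let less := cums.filter (fun c => c < days)
  (1 + (less.length : Int), days - less.getLast?.getD 0)

-- ===== PRECONDITION & SPEC =====
def Spec_monthCnt (days : Int) (year : Int) (out : Int × Int) : Prop := out = monthCnt_alt days year
instance (days : Int) (year : Int) (out : Int × Int) : Decidable (Spec_monthCnt days year out) := by unfold Spec_monthCnt; infer_instance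

-- ===== CLAIM (what is proved, stated in full; the proofs are below) =====
def Claim_equal_monthCnt : Prop := ∀ (days : Int) (year : Int), Dom_monthCnt days year → Spec_monthCnt days year (monthCnt days year)

-- ===== LEMMAS AND PROOFS =====

-- cumulative sums of a list starting from running total t
def cumF : Int → List Int → List Int
  | _, [] => []
  | t, x :: xs => (t + x) :: cumF (t + x) xs

lemma cum_gt (xs : List Int) (t : Int) (hpos : ∀ y ∈ xs, 0 < y) :
    ∀ c ∈ cumF t xs, t < c := by
  induction xs generalizing t with
  | nil => simp [cumF]
  | cons x xs ih =>
    intro c hc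
    have hx : 0 < x := hpos x (by simp)
    simp only [cumF, List.mem_cons] at hc
    rcases hc with rfl | hc
    · omega
    · have := ih (t + x) (fun y hy => hpos y (by simp [hy])) c hc
      omega

lemma getLast_getD_cons (l : List Int) (a t : Int) :
    ((a :: l).getLast?.getD t) = l.getLast?.getD a := by
  cases l with
  | nil => rfl
  | cons b l =>
    rw [List.getLast?_cons_cons]
    cases h : (b :: l).getLast? with
    | none => simp [List.getLast?_eq_none_iff] at h
    | some v => rfl

-- loop ↔ cumulative-sum characterisation
lemma loop_cum (ms : List Int) (m d t : Int) (hpos : ∀ y ∈ ms, 0 < y) :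
    monthLoop ms m d =
      (m + (((cumF t ms).filter (fun c => c < t + d)).length : Int),
       (t + d) - ((cumF t ms).filter (fun c => c < t + d)).getLast?.getD t) := by
  induction ms generalizing m d t with
  | nil => simp [monthLoop, cumF]
  | cons x xs ih =>
    have hx : 0 < x := hpos x (by simp)
    by_cases hlt : x < d
    · have hc : (t + x) < t + d := by omega
      have hrec := ih (m + 1) (d - x) (t + x) (fun y hy => hpos y (by simp [hy]))
      have ht : (t + x) + (d - x) = t + d := by ring
      rw [ht] at hrec
      simp only [monthLoop, if_pos hlt, hrec, cumF, List.filter_cons, decide_eq_true_eq,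
        if_pos hc, List.length_cons, getLast_getD_cons]
      rw [Prod.mk.injEq]
      exact ⟨by push_cast; ring, rfl⟩
    · have hfil : (cumF t (x :: xs)).filter (fun c => c < t + d) = [] := by
        rw [List.filter_eq_nil_iff]
        intro c hc
        simp only [cumF, List.mem_cons] at hc
        simp only [decide_eq_true_eq]
        rcases hc with rfl | hc
        · omega
        · have := cum_gt xs (t + x) (fun y hy => hpos y (by simp [hy])) c hc
          omega
      simp only [monthLoop, if_neg hlt, hfil]
      simp

lemma leap_iff (y : Int) :
    ((PySem.Int.mod y 4 == 0 && (PySem.Int.mod y 100 != 0 || PySem.Int.mod y 400 == 0)) = true)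
      ↔ dayInYear y = 366 := by
  unfold dayInYear
  split_ifs <;> simp_all

lemma monthCnt_eq_loop_leap (days year : Int) (h : dayInYear year = 366) (hd : days ≠ 0) :
    monthCnt days year = monthLoop [31, 29, 31, 30, 31, 30, 31, 31, 30, 31, 30, 31] 1 days := by
  simp [monthCnt, if_neg hd, h]

lemma monthCnt_eq_loop_common (days year : Int) (h : ¬ dayInYear year = 366) (hd : days ≠ 0) :
    monthCnt days year = monthLoop [31, 28, 31, 30, 31, 30, 31, 31, 30, 31, 30, 31] 1 days := by
  simp [monthCnt, if_neg hd, h]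

lemma alt_eq (days year : Int) (b : Bool)
    (hb : (PySem.Int.mod year 4 == 0 && (PySem.Int.mod year 100 != 0 || PySem.Int.mod year 400 == 0)) = b) :
    monthCnt_alt days year =
      (let cums := cumF 0 [31, if b then 29 else 28, 31, 30, 31, 30, 31, 31, 30, 31, 30, 31]
       let less := cums.filter (fun c => c < days)
       (1 + (less.length : Int), days - less.getLast?.getD 0)) := by
  unfold monthCnt_alt
  rw [hb]
  cases b <;> rfl

-- ===== VERDICT (by name: the statement is the Claim_ definition above) =====
theorem monthCnt_spec : Claim_equal_monthCnt := by
  intro days year _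
  unfold Spec_monthCnt
  by_cases hl : dayInYear year = 366
  · rw [alt_eq days year true ((leap_iff year).mpr hl)]
    by_cases hd : days = 0
    · subst hd; simp [monthCnt]; decide
    · rw [monthCnt_eq_loop_leap days year hl hd,
        loop_cum _ 1 days 0 (by decide)]
      simp [cumF]
  · rw [alt_eq days year false (by
      cases hcond : (PySem.Int.mod year 4 == 0 && (PySem.Int.mod year 100 != 0 || PySem.Int.mod year 400 == 0))
      · rfl
      · exact absurd ((leap_iff year).mp hcond) hl)]
    by_cases hd : days = 0
    · subst hd; simp [monthCnt]; decide
    · rw [monthCnt_eq_loop_common days year hl hd,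
        loop_cum _ 1 days 0 (by decide)]
      simp [cumF]
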